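-- pv_equiv track=rewrite | github.com/4Sight-platform/4Sight-ai-engine | onboarding/keyword_generation/keyword_analyzer.py | _find_location_keywords
-- ===== SOURCE A (Python) =====
-- from typing import List, Dict, Any, Tuple
--
-- def _find_location_keywords(keywords: List[str], profile: Dict[str, Any]) -> List[str]:
--     """Find keywords with location modifiers"""
--     locations = [loc.lower() for loc in profile.get('selected_locations', [])]
--     location_keywords = []
--
--     for keyword in keywords:
--         kw_lower = keyword.lower()
--         if any(loc in kw_lower for loc in locations) or 'near me' in kw_lower:
--             location_keywords.append(keyword)
--
--     return location_keywords
-- ===== SOURCE B (Python) =====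
-- from typing import List, Dict, Any
--
-- def _find_location_keywords(keywords: List[str], profile: Dict[str, Any]) -> List[str]:
--     # Loop inversion: instead of testing every location per keyword, make one
--     # pass PER LOCATION that updates a boolean match mask over all keywords
--     # (seeded with the 'near me' test), then emit keywords whose flag is set.
--     lowered = [kw.lower() for kw in keywords]
--     matched = ['near me' in s for s in lowered]
--     for loc in profile.get('selected_locations', []):
--         l = loc.lower()
--         matched = [m or (l in s) for m, s in zip(matched, lowered)]
--     return [kw for kw, m in zip(keywords, matched) if m]
-- ===== Notes on version B (the rewrite author's own statement) =====
-- stated objective: alternative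
-- what changed: B inverts the loop nesting: instead of A's keyword-major scan testing every location inside, B makes one pass per location updating a boolean match mask over all keywords (seeded with the 'near me' test) and finally filters keywords by their flag.
import Mathlib
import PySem

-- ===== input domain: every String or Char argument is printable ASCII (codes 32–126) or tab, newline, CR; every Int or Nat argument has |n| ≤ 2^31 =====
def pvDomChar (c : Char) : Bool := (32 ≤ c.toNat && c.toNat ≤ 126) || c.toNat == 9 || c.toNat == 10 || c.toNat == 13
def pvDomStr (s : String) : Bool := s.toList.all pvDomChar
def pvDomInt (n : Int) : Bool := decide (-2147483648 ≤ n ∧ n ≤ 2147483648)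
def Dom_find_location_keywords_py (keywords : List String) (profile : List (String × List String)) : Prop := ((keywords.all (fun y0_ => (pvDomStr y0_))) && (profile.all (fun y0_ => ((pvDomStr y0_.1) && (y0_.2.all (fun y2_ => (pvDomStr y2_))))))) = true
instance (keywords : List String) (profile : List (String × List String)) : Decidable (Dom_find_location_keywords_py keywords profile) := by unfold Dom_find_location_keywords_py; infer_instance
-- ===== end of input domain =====

-- ===== PORT A =====
-- Header: B inverts the loop nesting — one pass per location updating a boolean
-- match mask over all keywords, then a final flag filter; objective: alternative.
def find_location_keywords_py (keywords : List String) (profile : List (String × List String)) : List String :=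
  let locations := ((PySem.Dict.mk profile).getD "selected_locations" []).map (fun loc => PySem.Str.lower loc)
  keywords.foldl (fun acc keyword =>
    let kw_lower := PySem.Str.lower keyword
    if locations.any (fun loc => PySem.Str.isIn loc kw_lower) || PySem.Str.isIn "near me" kw_lower
    then acc ++ [keyword] else acc) []

-- ===== PORT B =====
def find_location_keywords_py_alt (keywords : List String) (profile : List (String × List String)) : List String :=
  let lowered := keywords.map (fun kw => PySem.Str.lower kw)
  let matched0 := lowered.map (fun s => PySem.Str.isIn "near me" s)
  let matched := ((PySem.Dict.mk profile).getD "selected_locations" []).foldl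
    (fun matched loc =>
      let l := PySem.Str.lower loc
      (matched.zip lowered).map (fun p => p.1 || PySem.Str.isIn l p.2)) matched0
  ((keywords.zip matched).filter (fun p => p.2)).map (fun p => p.1)

-- ===== PRECONDITION & SPEC =====
def Spec_find_location_keywords_py (keywords : List String) (profile : List (String × List String)) (out : List String) : Prop := out = find_location_keywords_py_alt keywords profile
instance (keywords : List String) (profile : List (String × List String)) (out : List String) : Decidable (Spec_find_location_keywords_py keywords profile out) := by unfold Spec_find_location_keywords_py; infer_instance

-- ===== CLAIM (what is proved, stated in full; the proofs are below) =====
def Claim_equal_find_location_keywords_py : Prop := ∀ (keywords : List String) (profile : List (String × List String)), Dom_find_location_keywords_py keywords profile → Spec_find_location_keywords_py keywords profile (find_location_keywords_py keywords profile)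

-- ===== LEMMAS AND PROOFS =====

-- one mask-update pass on a mask of the form `l.map f` is again a map
theorem zip_map_step {α : Type} (l : List α) (f : α → Bool) (g : α → Bool) :
    ((l.map f).zip l).map (fun p => p.1 || g p.2) = l.map (fun s => f s || g s) := by
  induction l with
  | nil => rfl
  | cons x xs ih => simp [ih]

-- the whole location fold keeps the mask a map over `lowered`
theorem mask_fold (l : List String) (locs : List String) (f : String → Bool) :
    locs.foldl (fun matched loc =>
        (matched.zip l).map (fun p => p.1 || PySem.Str.isIn (PySem.Str.lower loc) p.2))
      (l.map f)
    = l.map (fun s => f s || locs.any (fun loc => PySem.Str.isIn (PySem.Str.lower loc) s)) := by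
  induction locs generalizing f with
  | nil => simp
  | cons loc rest ih =>
    simp only [List.foldl_cons, zip_map_step, ih, List.any_cons]
    apply List.map_congr_left
    intro s _
    cases f s <;> cases PySem.Str.isIn (PySem.Str.lower loc) s <;>
      cases rest.any (fun loc => PySem.Str.isIn (PySem.Str.lower loc) s) <;> rfl

-- zipping a list with a map of itself and filtering on the flag is a filter
theorem zip_map_filter {α : Type} (l : List α) (g : α → Bool) :
    ((l.zip (l.map g)).filter (fun p => p.2)).map (fun p => p.1) = l.filter g := by
  induction l with
  | nil => rfl
  | cons x xs ih => cases h : g x <;> simp [h, ih]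

-- ===== VERDICT (by name: the statement is the Claim_ definition above) =====
theorem find_location_keywords_py_spec : Claim_equal_find_location_keywords_py := by
  intro keywords profile _
  unfold Spec_find_location_keywords_py find_location_keywords_py find_location_keywords_py_alt
  rw [PySem.List.foldl_append_if_eq_filter]
  simp only [List.nil_append]
  have hmask := mask_fold (keywords.map (fun kw => PySem.Str.lower kw))
    ((PySem.Dict.mk profile).getD "selected_locations" [])
    (fun s => PySem.Str.isIn "near me" s)
  rw [hmask, List.map_map]
  rw [zip_map_filter]
  apply List.filter_congr
  intro kw _
  simp only [List.any_map, Function.comp]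
  cases h1 : ((PySem.Dict.mk profile).getD "selected_locations" []).any
      (fun loc => PySem.Str.isIn (PySem.Str.lower loc) (PySem.Str.lower kw)) <;>
    cases h2 : PySem.Str.isIn "near me" (PySem.Str.lower kw) <;> simp_all
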